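-- pv_equiv track=rewrite | github.com/cppascalinux/pku_homework | mid_term/part5.py | build_re
-- ===== SOURCE A (Python) =====
-- def build_re(s,use_re):
-- 	if use_re:#表示使用*?作为通配符
-- 		punc='.+$^[]}{()|\\'#在正则表达式模式串中需要转义的字符
-- 	else:#不使用通配符
-- 		punc='.+$^[]}{()|\\?*'
-- 	t=''#生成的模式串
-- 	for c in s:
-- 		if c in punc:#需要转义
-- 			t+='\\'+c
-- 		elif c=='?':#通配符
-- 			t+='.?'
-- 		elif c=='*':#通配符
-- 			t+='.*'
-- 		else:#直接添加该字符
-- 			t+=c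
-- 	return t
-- ===== SOURCE B (Python) =====
-- def build_re(s, use_re):
--     # stage 1: escape every regex metacharacter (wildcards included)
--     t = ''.join('\\' + c if c in '.+$^[]}{()|\\?*' else c for c in s)
--     # stage 2: when wildcards are enabled, rewrite their escapes globally
--     if use_re:
--         t = t.replace('\\?', '.?').replace('\\*', '.*')
--     return t
-- ===== Notes on version B (the rewrite author's own statement) =====
-- stated objective: alternative
-- what changed: Replaces A's single conditional per-character if/elif loop with string += by a staged pipeline: one unconditional join-pass escapes every metacharacter (wildcards included), then a global str.replace pass rewrites the wildcard escapes \? and \* to .? and .* when use_re is set.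
import Mathlib
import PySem

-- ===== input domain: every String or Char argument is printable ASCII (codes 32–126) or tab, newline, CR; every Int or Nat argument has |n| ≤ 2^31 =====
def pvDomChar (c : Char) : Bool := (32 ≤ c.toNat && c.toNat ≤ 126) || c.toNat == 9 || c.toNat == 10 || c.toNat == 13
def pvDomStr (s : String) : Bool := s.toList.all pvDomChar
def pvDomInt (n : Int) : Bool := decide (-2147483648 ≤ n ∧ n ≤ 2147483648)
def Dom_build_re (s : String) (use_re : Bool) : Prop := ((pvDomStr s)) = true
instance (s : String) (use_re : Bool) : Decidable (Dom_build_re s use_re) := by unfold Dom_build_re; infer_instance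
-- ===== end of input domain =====

-- B is a staged pipeline (escape every metacharacter, then globally rewrite the wildcard
-- escapes when use_re) replacing A's single conditional branch loop (objective: alternative).

-- the regex metacharacters '.+$^[]}{()|\' (a string in Python, its chars here)
def puncBase : List Char := ['.','+','$','^','[',']','}','{','(',')','|','\\']

-- ===== PORT A =====
def build_re (s : String) (use_re : Bool) : String :=
  let punc : List Char := if use_re then puncBase else puncBase ++ ['?', '*']
  String.ofList (s.toList.foldl (fun t c =>
    if punc.contains c then t ++ ['\\', c]
    else if c = '?' then t ++ ['.', '?']
    else if c = '*' then t ++ ['.', '*']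
    else t ++ [c]) [])

-- ===== PORT B =====
-- stage 1 of Source B: '\\' + c if c in '.+$^[]}{()|\\?*' else c, for each char, joined
def escChunk (c : Char) : List Char :=
  if (puncBase ++ ['?', '*']).contains c then ['\\', c] else [c]

def build_re_alt (s : String) (use_re : Bool) : String :=
  let t := String.ofList ((s.toList.map escChunk).flatten)
  if use_re then PySem.Str.replace (PySem.Str.replace t "\\?" ".?") "\\*" ".*" else t

-- ===== PRECONDITION & SPEC =====
def Spec_build_re (s : String) (use_re : Bool) (out : String) : Prop := out = build_re_alt s use_re
instance (s : String) (use_re : Bool) (out : String) : Decidable (Spec_build_re s use_re out) := by unfold Spec_build_re; infer_instance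

-- ===== CLAIM (what is proved, stated in full; the proofs are below) =====
def Claim_equal_build_re : Prop := ∀ (s : String) (use_re : Bool), Dom_build_re s use_re → Spec_build_re s use_re (build_re s use_re)

-- ===== LEMMAS AND PROOFS =====

-- unfolding equations for PySem.Chars.replace.go
theorem go_zero (old new acc l : List Char) :
    PySem.Chars.replace.go old new 0 l acc = acc.reverse ++ l := by
  rw [PySem.Chars.replace.go]

theorem go_nil (old new acc : List Char) (fuel : Nat) :
    PySem.Chars.replace.go old new (fuel+1) [] acc = acc.reverse := by
  rw [PySem.Chars.replace.go]; omega

theorem go_cons (old new : List Char) (fuel : Nat) (c : Char) (t acc : List Char) :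
    PySem.Chars.replace.go old new (fuel+1) (c :: t) acc =
      if old.isPrefixOf (c :: t) then
        PySem.Chars.replace.go old new fuel (List.drop old.length (c :: t)) (new.reverse ++ acc)
      else PySem.Chars.replace.go old new fuel t (c :: acc) := by
  rw [PySem.Chars.replace.go]

-- the head of a flatten of nonempty chunks is the head of the first chunk: never b
theorem flatten_head_ne (b : Char) (C : Char → List Char)
    (hne : ∀ c, C c ≠ []) (hhead : ∀ c, (C c).head? ≠ some b) :
    ∀ s : List Char, ((s.map C).flatten).head? ≠ some b := by
  intro s
  cases s with
  | nil => simp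
  | cons c s =>
    simp only [List.map_cons, List.flatten_cons]
    cases hC : C c with
    | nil => exact absurd hC (hne c)
    | cons u t =>
      have := hhead c
      rw [hC] at this
      simpa using this

-- no match of the two-char pattern can start at the last char of a chunk:
-- the next char (the head of the remaining flatten) is never b
theorem isPrefixOf_flatten_false (a b : Char) (C : Char → List Char)
    (hne : ∀ c, C c ≠ []) (hhead : ∀ c, (C c).head? ≠ some b)
    (v : Char) (s : List Char) :
    ([a, b] : List Char).isPrefixOf (v :: (s.map C).flatten) = false := by
  cases hh : ((s.map C).flatten) with
  | nil => simp [List.isPrefixOf]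
  | cons d t =>
    have hd : d ≠ b := by
      have := flatten_head_ne b C hne hhead s
      rw [hh] at this; simpa using this
    simp only [List.isPrefixOf, Bool.and_eq_false_iff]
    right
    simp [Ne.symm hd]

-- the core lemma: on a flatten of length-1/length-2 chunks none of which exposes the
-- pattern's second char at its head, replace.go rewrites exactly the chunks equal to
-- the pattern [a,b] into `new`, chunk by chunk
theorem go_chunks (a b : Char) (new : List Char) (C : Char → List Char)
    (hlen : ∀ c, C c = [c] ∨ ∃ u v, C c = [u, v])
    (hhead : ∀ c, (C c).head? ≠ some b) :
    ∀ (s : List Char) (fuel : Nat) (acc : List Char),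
      ((s.map C).flatten).length ≤ fuel →
      PySem.Chars.replace.go [a, b] new fuel ((s.map C).flatten) acc
        = acc.reverse ++ (s.map (fun c => if C c = [a, b] then new else C c)).flatten := by
  have hne : ∀ c, C c ≠ [] := by
    intro c; rcases hlen c with h | ⟨u, v, h⟩ <;> simp [h]
  intro s
  induction s with
  | nil =>
    intro fuel acc _
    cases fuel with
    | zero => simpa using go_zero [a, b] new acc []
    | succ f => simpa using go_nil [a, b] new acc f
  | cons c s ih =>
    intro fuel acc hfuel
    by_cases heq : C c = [a, b]
    · -- the chunk is exactly the pattern: it matches and is skipped whole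
      simp only [List.map_cons, List.flatten_cons, heq, List.cons_append,
        List.nil_append, List.length_cons] at hfuel ⊢
      cases fuel with
      | zero => omega
      | succ f =>
        rw [go_cons]
        have hpf : ([a, b] : List Char).isPrefixOf (a :: b :: (s.map C).flatten) = true := by
          simp [List.isPrefixOf]
        rw [hpf]
        simp only [if_true, List.length_cons, List.length_nil, List.drop_succ_cons,
          List.drop_zero]
        rw [ih f (new.reverse ++ acc) (by omega)]
        simp
    · rcases hlen c with hC | ⟨u, v, hC⟩
      · -- singleton chunk [c]: no match can start here
        simp only [List.map_cons, List.flatten_cons, hC, List.cons_append,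
          List.nil_append, List.length_cons] at hfuel ⊢
        cases fuel with
        | zero => omega
        | succ f =>
          rw [go_cons, isPrefixOf_flatten_false a b C hne hhead c s]
          simp only [Bool.false_eq_true, if_false]
          rw [ih f (c :: acc) (by omega)]
          simp [hC]
      · -- two-char chunk [u, v] ≠ [a, b]: no match at either offset
        simp only [List.map_cons, List.flatten_cons, hC, List.cons_append,
          List.nil_append, List.length_cons] at hfuel ⊢
        cases fuel with
        | zero => omega
        | succ f =>
          rw [go_cons]
          have huv : ¬(u = a ∧ v = b) := by
            intro ⟨h1, h2⟩; exact heq (by rw [hC, h1, h2])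
          have hnp : ([a, b] : List Char).isPrefixOf (u :: v :: (s.map C).flatten) = false := by
            by_cases hu : u = a
            · have hv : v ≠ b := fun hv => huv ⟨hu, hv⟩
              simp only [List.isPrefixOf, Bool.and_eq_false_iff]
              right; left; simp [Ne.symm hv]
            · simp only [List.isPrefixOf, Bool.and_eq_false_iff]
              left; simp [Ne.symm hu]
          rw [hnp]
          simp only [Bool.false_eq_true, if_false]
          cases f with
          | zero => omega
          | succ f' =>
            rw [go_cons, isPrefixOf_flatten_false a b C hne hhead v s]
            simp only [Bool.false_eq_true, if_false]
            rw [ih f' (v :: u :: acc) (by omega)]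
            simp [huv]

-- Chars.replace on a flatten of such chunks, with the pattern a two-char string
theorem replace_chunks (a b : Char) (new : List Char) (C : Char → List Char)
    (hlen : ∀ c, C c = [c] ∨ ∃ u v, C c = [u, v])
    (hhead : ∀ c, (C c).head? ≠ some b) (s : List Char) :
    PySem.Chars.replace ((s.map C).flatten) [a, b] new
      = (s.map (fun c => if C c = [a, b] then new else C c)).flatten := by
  rw [PySem.Chars.replace]
  simp only [List.isEmpty_cons, Bool.false_eq_true, if_false]
  simpa using go_chunks a b new C hlen hhead s ((s.map C).flatten).length [] le_rfl

-- stage-1 chunks after the '\?' → '.?' rewrite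
def escChunk1 (c : Char) : List Char := if c = '?' then ['.', '?'] else escChunk c

-- A's per-character chunk with use_re = true
def chunkTrue (c : Char) : List Char :=
  if puncBase.contains c then ['\\', c]
  else if c = '?' then ['.', '?']
  else if c = '*' then ['.', '*']
  else [c]

theorem escChunk_cases (c : Char) : escChunk c = [c] ∨ ∃ u v, escChunk c = [u, v] := by
  unfold escChunk; split_ifs
  · exact Or.inr ⟨'\\', c, rfl⟩
  · exact Or.inl rfl

theorem escChunk_head (c : Char) : (escChunk c).head? ≠ some '?' := by
  unfold escChunk; split_ifs with h
  · simp
  · simp only [List.head?_cons, ne_eq, Option.some.injEq]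
    intro hc; subst hc; exact h (by decide)

theorem replace_q (s : List Char) :
    PySem.Chars.replace ((s.map escChunk).flatten) ['\\', '?'] ['.', '?']
      = (s.map escChunk1).flatten := by
  rw [replace_chunks '\\' '?' ['.', '?'] escChunk escChunk_cases escChunk_head]
  congr 1
  apply List.map_congr_left
  intro c _
  by_cases h : c = '?'
  · subst h; decide
  · have hne : escChunk c ≠ ['\\', '?'] := by
      unfold escChunk; split_ifs
      · intro hx; simp only [List.cons.injEq] at hx; exact h hx.2.1
      · intro hx; simp at hx
    rw [if_neg hne, escChunk1, if_neg h]

theorem escChunk1_cases (c : Char) : escChunk1 c = [c] ∨ ∃ u v, escChunk1 c = [u, v] := by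
  unfold escChunk1 escChunk; split_ifs
  · exact Or.inr ⟨'.', '?', rfl⟩
  · exact Or.inr ⟨'\\', c, rfl⟩
  · exact Or.inl rfl

theorem escChunk1_head (c : Char) : (escChunk1 c).head? ≠ some '*' := by
  unfold escChunk1 escChunk; split_ifs with h1 h2
  · simp
  · simp
  · simp only [List.head?_cons, ne_eq, Option.some.injEq]
    intro hc; subst hc; exact h2 (by decide)

theorem replace_star (s : List Char) :
    PySem.Chars.replace ((s.map escChunk1).flatten) ['\\', '*'] ['.', '*']
      = (s.map chunkTrue).flatten := by
  rw [replace_chunks '\\' '*' ['.', '*'] escChunk1 escChunk1_cases escChunk1_head]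
  congr 1
  apply List.map_congr_left
  intro c _
  by_cases h : c ∈ (['.','+','$','^','[',']','}','{','(',')','|','\\','?','*'] : List Char)
  · fin_cases h <;> decide
  · simp only [List.mem_cons, List.not_mem_nil, or_false, not_or] at h
    obtain ⟨h1,h2,h3,h4,h5,h6,h7,h8,h9,h10,h11,h12,h13,h14⟩ := h
    have he : escChunk1 c = [c] := by
      simp [escChunk1, escChunk, puncBase, h13, h1,h2,h3,h4,h5,h6,h7,h8,h9,h10,h11,h12,h14]
    rw [he]
    have hne : ([c] : List Char) ≠ ['\\', '*'] := by intro hx; simp at hx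
    rw [if_neg hne]
    simp [chunkTrue, puncBase, h1,h2,h3,h4,h5,h6,h7,h8,h9,h10,h11,h12,h13,h14]

-- a foldl that appends a per-character chunk is the flatten of the chunk list
theorem build_re_fold (f : Char → List Char) (l acc : List Char) :
    l.foldl (fun t c => t ++ f c) acc = acc ++ (l.map f).flatten := by
  induction l generalizing acc with
  | nil => simp
  | cons c l ih => simp [List.foldl, ih]

-- A's loop, per value of use_re, as a flatten of per-character chunks
theorem build_re_as_chunks (s : String) (use_re : Bool) :
    build_re s use_re
      = String.ofList ((s.toList.map (if use_re then chunkTrue else escChunk)).flatten) := by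
  unfold build_re
  simp only []
  have hfun : (fun (t : List Char) c =>
      if (if use_re then puncBase else puncBase ++ ['?', '*']).contains c then t ++ ['\\', c]
      else if c = '?' then t ++ ['.', '?']
      else if c = '*' then t ++ ['.', '*']
      else t ++ [c]) = fun (t : List Char) c => t ++
        (if (if use_re then puncBase else puncBase ++ ['?', '*']).contains c then ['\\', c]
         else if c = '?' then ['.', '?']
         else if c = '*' then ['.', '*']
         else [c]) := by
    funext t c; split_ifs <;> rfl
  rw [hfun, build_re_fold]
  simp only [List.nil_append]
  congr 2
  apply List.map_congr_left
  intro c _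
  cases use_re with
  | true => simp [chunkTrue]
  | false =>
    simp only [Bool.false_eq_true, if_false, escChunk]
    split_ifs with hp h2 h3
    · rfl
    · exfalso; apply hp; simp [puncBase, h2]
    · exfalso; apply hp; simp [puncBase, h3]
    · rfl

-- ===== VERDICT (by name: the statement is the Claim_ definition above) =====
theorem build_re_spec : Claim_equal_build_re := by
  intro s use_re _
  unfold Spec_build_re build_re_alt
  rw [build_re_as_chunks]
  cases use_re with
  | false => simp
  | true =>
    simp only [if_true]
    have h1 : PySem.Str.replace (String.ofList ((s.toList.map escChunk).flatten)) "\\?" ".?"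
        = String.ofList ((s.toList.map escChunk1).flatten) := by
      apply String.toList_injective
      rw [PySem.Str.toList_replace]
      simpa using replace_q s.toList
    rw [h1]
    apply String.toList_injective
    rw [PySem.Str.toList_replace]
    simpa using (replace_star s.toList).symm
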